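-- pv_equiv track=rewrite | github.com/ZipS1/credit_ms | launcher.py | _check_for_comma
-- ===== SOURCE A (Python) =====
-- def _check_for_comma(cmd):
--     contains_comma = False
--     comma_index = 0
--     for ind, i in enumerate(cmd):
--
--         if i.endswith(",") and contains_comma:
--             contains_comma = False
--             break
--
--         if i.endswith(","):
--             contains_comma = True
--             comma_index = ind
--             continue
--     return contains_comma, comma_index
-- ===== SOURCE B (Python) =====
-- def _check_for_comma(cmd):
--     matches = [ind for ind, token in enumerate(cmd) if token.endswith(",")]
--     return len(matches) == 1, (matches[0] if matches else 0)
-- ===== Notes on version B (the rewrite author's own statement) =====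
-- stated objective: simpler
-- what changed: Replaces A's stateful toggle-with-early-break loop by collecting all comma-ending token indices once and reading the answer off as (exactly one match, first index or 0).
import Mathlib
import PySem

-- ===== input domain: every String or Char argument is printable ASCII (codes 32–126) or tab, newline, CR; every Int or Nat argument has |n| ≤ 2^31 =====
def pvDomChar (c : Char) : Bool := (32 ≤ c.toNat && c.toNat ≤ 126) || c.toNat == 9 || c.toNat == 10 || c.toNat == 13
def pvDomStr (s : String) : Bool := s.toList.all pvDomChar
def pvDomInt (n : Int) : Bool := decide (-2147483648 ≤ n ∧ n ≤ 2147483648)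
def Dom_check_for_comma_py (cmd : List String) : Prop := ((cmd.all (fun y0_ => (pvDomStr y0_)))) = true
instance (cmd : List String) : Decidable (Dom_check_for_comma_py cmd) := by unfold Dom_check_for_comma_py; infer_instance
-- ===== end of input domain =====

-- B replaces A's stateful toggle loop with early break by collecting all comma-ending
-- token indices once and reading off (exactly one match, first index or 0): simpler decomposition.


-- ===== PORT A =====
-- the for-loop with its two-flag state and early `break`, step for step
def checkCommaLoopA (rest : List String) (ind : Int) (contains_comma : Bool) (comma_index : Int) : Bool × Int :=
  match rest with
  | [] => (contains_comma, comma_index)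
  | i :: rest' =>
    if PySem.Str.endswith i "," && contains_comma then
      (false, comma_index)                                   -- contains_comma = False; break
    else if PySem.Str.endswith i "," then
      checkCommaLoopA rest' (ind + 1) true ind               -- set flag and remember index; continue
    else
      checkCommaLoopA rest' (ind + 1) contains_comma comma_index

def check_for_comma_py (cmd : List String) : Bool × Int :=
  checkCommaLoopA cmd 0 false 0

-- ===== PORT B =====
def check_for_comma_py_alt (cmd : List String) : Bool × Int :=
  let ms := (PySem.List.enumerate cmd).filter (fun p => PySem.Str.endswith p.2 ",")
  (ms.length == 1, match ms.head? with | some p => p.1 | none => 0)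

-- ===== PRECONDITION & SPEC =====
def Spec_check_for_comma_py (cmd : List String) (out : Bool × Int) : Prop := out = check_for_comma_py_alt cmd
instance (cmd : List String) (out : Bool × Int) : Decidable (Spec_check_for_comma_py cmd out) := by unfold Spec_check_for_comma_py; infer_instance

-- ===== CLAIM (what is proved, stated in full; the proofs are below) =====
def Claim_equal_check_for_comma_py : Prop := ∀ (cmd : List String), Dom_check_for_comma_py cmd → Spec_check_for_comma_py cmd (check_for_comma_py cmd)

-- ===== LEMMAS AND PROOFS =====

theorem filterEnum_eq_nil_iff (q : String → Bool) (r : List String) (s : Int) :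
    ((PySem.List.enumerate r s).filter (fun p => q p.2)) = [] ↔ r.any q = false := by
  induction r generalizing s with
  | nil => simp [PySem.List.enumerate_nil]
  | cons i r ih =>
    cases h : q i <;> simp [PySem.List.enumerate_cons, h, ih]

theorem loopA_true (r : List String) (ind comma_index : Int) :
    checkCommaLoopA r ind true comma_index =
      (!(r.any (fun t => PySem.Chars.endswith t.toList [','])), comma_index) := by
  induction r generalizing ind with
  | nil => simp [checkCommaLoopA]
  | cons i r ih =>
    by_cases h : PySem.Chars.endswith i.toList [','] = true <;>
      simp [checkCommaLoopA, h, ih]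

theorem loopA_false (r : List String) (ind comma_index : Int) :
    checkCommaLoopA r ind false comma_index =
      (let m := (PySem.List.enumerate r ind).filter (fun p => PySem.Chars.endswith p.2.toList [','])
       ((m.length == 1 : Bool), match m.head? with | some p => p.1 | none => comma_index)) := by
  induction r generalizing ind with
  | nil => simp [checkCommaLoopA, PySem.List.enumerate_nil]
  | cons i r ih =>
    by_cases h : PySem.Chars.endswith i.toList [','] = true
    · rcases hm : (PySem.List.enumerate r (ind + 1)).filter
          (fun p => PySem.Chars.endswith p.2.toList [',']) with _ | ⟨p, m'⟩
      · have hA : r.any (fun t => PySem.Chars.endswith t.toList [',']) = false :=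
          (filterEnum_eq_nil_iff (fun t => PySem.Chars.endswith t.toList [',']) r (ind + 1)).mp hm
        simp [checkCommaLoopA, h, loopA_true, PySem.List.enumerate_cons, hm, hA]
      · have hA : r.any (fun t => PySem.Chars.endswith t.toList [',']) = true := by
          by_contra hF
          have h0 : r.any (fun t => PySem.Chars.endswith t.toList [',']) = false := by
            revert hF; cases r.any (fun t => PySem.Chars.endswith t.toList [',']) <;> simp
          rw [(filterEnum_eq_nil_iff (fun t => PySem.Chars.endswith t.toList [',']) r (ind + 1)).mpr h0] at hm
          cases hm
        simp [checkCommaLoopA, h, loopA_true, PySem.List.enumerate_cons, hm, hA]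
    · simp [checkCommaLoopA, h, PySem.List.enumerate_cons, ih]

-- ===== VERDICT (by name: the statement is the Claim_ definition above) =====
theorem check_for_comma_py_spec : Claim_equal_check_for_comma_py := by
  intro cmd _
  show check_for_comma_py cmd = check_for_comma_py_alt cmd
  exact loopA_false cmd 0 0
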